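-- pv_equiv track=rewrite | github.com/Mohammed-Zaid-ZH/EchoOs | EchoOS_PySide6/modules/universal_command_executor.py | _find_matching_file
-- ===== SOURCE A (Python) =====
-- from typing import Optional, Dict, List, Any, Tuple
--
-- def _find_matching_file(text: str, screen_text: str) -> Optional[str]:
--     """Find matching file/folder from screen text"""
--     # Extract what user wants to open
--     if 'open' in text:
--         target = text.split('open', 1)[1].strip()
--     else:
--         target = text.strip()
--
--     # Look for matching files in screen text
--     lines = screen_text.split('\n')
--     for line in lines:
--         if target.lower() in line.lower():
--             # Extract filename from line
--             words = line.split()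
--             for word in words:
--                 if target.lower() in word.lower():
--                     return word.strip()
--
--     return None
-- ===== SOURCE B (Python) =====
-- from typing import Optional
--
-- def _find_matching_file(text: str, screen_text: str) -> Optional[str]:
--     """Find matching file/folder from screen text"""
--     if 'open' in text:
--         target = text.split('open', 1)[1].strip()
--     else:
--         target = text.strip()
--     t = target.lower()
--     return next((w.strip() for w in screen_text.split() if t in w.lower()), None)
-- ===== Notes on version B (the rewrite author's own statement) =====
-- stated objective: idiomatic
-- what changed: Replaced the nested line-loop (line containment gate + inner word scan) by one pass over all whitespace tokens of the whole screen text, since a token containing the target always lies on a line containing it.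
import Mathlib
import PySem

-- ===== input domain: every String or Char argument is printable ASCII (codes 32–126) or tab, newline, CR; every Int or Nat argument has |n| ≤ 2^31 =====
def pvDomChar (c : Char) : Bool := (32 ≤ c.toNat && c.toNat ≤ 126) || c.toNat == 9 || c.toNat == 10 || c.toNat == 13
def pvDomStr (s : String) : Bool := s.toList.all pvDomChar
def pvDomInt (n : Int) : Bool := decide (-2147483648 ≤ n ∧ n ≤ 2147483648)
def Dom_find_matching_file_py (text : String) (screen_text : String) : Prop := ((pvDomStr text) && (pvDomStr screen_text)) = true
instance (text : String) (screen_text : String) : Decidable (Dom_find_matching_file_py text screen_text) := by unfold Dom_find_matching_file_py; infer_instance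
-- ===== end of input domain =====

-- B replaces A's nested loop over lines (line containment gate, then word scan) by one
-- pass over the whitespace tokens of the whole screen text (idiomatic; same cost).

-- ===== PORT A =====
-- inner loop: 'for word in words: if target.lower() in word.lower(): return word.strip()'
def pvFindWordA (tl : List Char) : List (List Char) → Option (List Char)
  | [] => none
  | w :: ws =>
    if PySem.Chars.isIn tl (PySem.Chars.lower w) then some (PySem.Chars.strip w)
    else pvFindWordA tl ws

-- outer loop: 'for line in lines: if target.lower() in line.lower(): …'
def pvLoopA (tl : List Char) : List (List Char) → Option (List Char)
  | [] => none
  | line :: rest =>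
    if PySem.Chars.isIn tl (PySem.Chars.lower line) then
      match pvFindWordA tl (PySem.Chars.split₀ line) with
      | some w => some w
      | none => pvLoopA tl rest
    else pvLoopA tl rest

def find_matching_file_py (text : String) (screen_text : String) : Option String :=
  let target : String :=
    if PySem.Str.isIn "open" text then
      -- text.split('open', 1)[1].strip(); index 1 always exists since 'open' in text
      PySem.Str.strip (((PySem.Str.splitMax? text "open" 1).getD []).getD 1 "")
    else PySem.Str.strip text
  (pvLoopA (PySem.Chars.lower target.toList)
      (PySem.Chars.splitOn screen_text.toList ['\n'])).map String.ofList

-- ===== PORT B =====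
def find_matching_file_py_alt (text : String) (screen_text : String) : Option String :=
  let target : String :=
    if PySem.Str.isIn "open" text then
      PySem.Str.strip (((PySem.Str.splitMax? text "open" 1).getD []).getD 1 "")
    else PySem.Str.strip text
  let tl := PySem.Chars.lower target.toList
  -- next((w.strip() for w in screen_text.split() if t in w.lower()), None)
  ((PySem.Chars.split₀ screen_text.toList).find?
      (fun w => PySem.Chars.isIn tl (PySem.Chars.lower w))).map
    (fun w => String.ofList (PySem.Chars.strip w))

-- ===== PRECONDITION & SPEC =====
def Spec_find_matching_file_py (text : String) (screen_text : String) (out : Option String) : Prop := out = find_matching_file_py_alt text screen_text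
instance (text : String) (screen_text : String) (out : Option String) : Decidable (Spec_find_matching_file_py text screen_text out) := by unfold Spec_find_matching_file_py; infer_instance

-- ===== CLAIM (what is proved, stated in full; the proofs are below) =====
def Claim_equal_find_matching_file_py : Prop := ∀ (text : String) (screen_text : String), Dom_find_matching_file_py text screen_text → Spec_find_matching_file_py text screen_text (find_matching_file_py text screen_text)

-- ===== LEMMAS AND PROOFS =====

-- accumulator-free form of PySem.Chars.split₀.go
def pvWaux : List Char → List Char → List (List Char)
  | [], cur => if cur.isEmpty then [] else [cur.reverse]
  | c :: rest, cur =>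
    if PySem.Chars.isspace c then
      (if cur.isEmpty then pvWaux rest [] else cur.reverse :: pvWaux rest [])
    else pvWaux rest (c :: cur)

-- accumulator-free form of PySem.Chars.splitOn.go for the separator ['\n']
def pvLaux : List Char → List Char → List (List Char)
  | [], cur => [cur.reverse]
  | c :: rest, cur =>
    if c = '\n' then cur.reverse :: pvLaux rest [] else pvLaux rest (c :: cur)

theorem pvSplit₀_go_eq (l : List Char) : ∀ cur acc,
    PySem.Chars.split₀.go l cur acc = acc.reverse ++ pvWaux l cur := by
  induction l with
  | nil => intro cur acc; simp [PySem.Chars.split₀.go, pvWaux]; split <;> simp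
  | cons c rest ih =>
    intro cur acc
    simp only [PySem.Chars.split₀.go, pvWaux]
    split
    · split <;> simp [ih]
    · exact ih _ _

theorem pvSplit₀_eq (s : List Char) : PySem.Chars.split₀ s = pvWaux s [] := by
  simp [PySem.Chars.split₀, pvSplit₀_go_eq]

theorem pvSplitOn_go_eq : ∀ (fuel : Nat) (l cur : List Char) (acc : List (List Char)),
    l.length < fuel →
    PySem.Chars.splitOn.go ['\n'] fuel l cur acc = acc.reverse ++ pvLaux l cur := by
  intro fuel
  induction fuel with
  | zero => intro l cur acc h; omega
  | succ fuel ih =>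
    intro l cur acc h
    cases l with
    | nil => simp [PySem.Chars.splitOn.go, pvLaux]
    | cons c rest =>
      rw [PySem.Chars.splitOn.go]
      by_cases hc : c = '\n'
      · subst hc
        rw [show List.isPrefixOf ['\n'] ('\n' :: rest) = true by simp [List.isPrefixOf]]
        rw [if_pos rfl]
        rw [show List.drop ['\n'].length ('\n' :: rest) = rest by simp]
        rw [ih rest [] (cur.reverse :: acc) (by simp at h ⊢; omega)]
        simp [pvLaux]
      · rw [show List.isPrefixOf ['\n'] (c :: rest) = false by
          simp [List.isPrefixOf]; exact fun hh => hc hh.symm]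
        rw [if_neg (by simp)]
        rw [ih rest (c :: cur) acc (by simp at h ⊢; omega)]
        simp [pvLaux, hc]

theorem pvSplitOn_eq (s : List Char) : PySem.Chars.splitOn s ['\n'] = pvLaux s [] := by
  rw [PySem.Chars.splitOn, pvSplitOn_go_eq (s.length + 1) s [] [] (by omega)]
  simp

theorem pvWaux_space {c : Char} (hc : PySem.Chars.isspace c = true) (b : List Char) :
    ∀ (a cur : List Char), pvWaux (a ++ c :: b) cur = pvWaux a cur ++ pvWaux b [] := by
  intro a
  induction a with
  | nil => intro cur; simp [pvWaux, hc]; split <;> simp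
  | cons x a' ih =>
    intro cur
    simp only [List.cons_append, pvWaux]
    split
    · split <;> simp [ih]
    · exact ih _

theorem pvMain (l : List Char) : ∀ cur,
    pvWaux (cur.reverse ++ l) [] = (pvLaux l cur).flatMap (fun m => pvWaux m []) := by
  induction l with
  | nil => intro cur; simp [pvLaux]
  | cons c rest ih =>
    intro cur
    by_cases hc : c = '\n'
    · subst hc
      rw [pvWaux_space (by decide)]
      rw [show pvLaux ('\n' :: rest) cur = cur.reverse :: pvLaux rest [] from by simp [pvLaux]]
      rw [List.flatMap_cons]
      have h0 := ih []
      simp only [List.reverse_nil, List.nil_append] at h0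
      rw [h0]
    · rw [show pvLaux (c :: rest) cur = pvLaux rest (c :: cur) from by simp [pvLaux, hc]]
      have h1 := ih (c :: cur)
      simp only [List.reverse_cons] at h1
      rw [← h1]
      simp [List.append_assoc]

theorem pvFlatten_split (s : List Char) :
    (PySem.Chars.splitOn s ['\n']).flatMap PySem.Chars.split₀ = PySem.Chars.split₀ s := by
  rw [pvSplitOn_eq, pvSplit₀_eq, show PySem.Chars.split₀ = fun m => pvWaux m [] from funext pvSplit₀_eq]
  have := pvMain s []
  simp only [List.reverse_nil, List.nil_append] at this
  rw [this]

theorem pvMem_waux (l : List Char) : ∀ cur w, w ∈ pvWaux l cur → w <:+: (cur.reverse ++ l) := by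
  induction l with
  | nil =>
    intro cur w hw
    simp only [pvWaux] at hw
    split at hw
    · simp at hw
    · simp at hw; subst hw; simp
  | cons c rest ih =>
    intro cur w hw
    have hrest : rest <:+: (cur.reverse ++ c :: rest) :=
      ((List.suffix_cons c rest).trans (List.suffix_append cur.reverse (c :: rest))).isInfix
    simp only [pvWaux] at hw
    split at hw
    · split at hw
      · have := ih [] w (by simpa using hw)
        simp only [List.reverse_nil, List.nil_append] at this
        exact this.trans hrest
      · rcases (List.mem_cons.mp hw) with h | h
        · subst h
          exact (List.prefix_append cur.reverse (c :: rest)).isInfix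
        · have := ih [] w (by simpa using h)
          simp only [List.reverse_nil, List.nil_append] at this
          exact this.trans hrest
    · have := ih (c :: cur) w hw
      simpa [List.append_assoc] using this

theorem pvGate {tl line : List Char}
    (h : PySem.Chars.isIn tl (PySem.Chars.lower line) = false) :
    ∀ w ∈ PySem.Chars.split₀ line, PySem.Chars.isIn tl (PySem.Chars.lower w) = false := by
  intro w hw
  by_contra hne
  rw [Bool.not_eq_false, PySem.Chars.isIn_iff_infix] at hne
  rw [PySem.Chars.isIn_eq_false_iff] at h
  apply h
  have hinf : w <:+: line := by
    rw [pvSplit₀_eq] at hw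
    simpa using pvMem_waux line [] w hw
  exact hne.trans (by simpa [PySem.Chars.lower] using hinf.map PySem.Chars.lowerChar)

theorem pvFindWordA_eq (tl : List Char) (ws : List (List Char)) :
    pvFindWordA tl ws
      = (ws.find? (fun w => PySem.Chars.isIn tl (PySem.Chars.lower w))).map PySem.Chars.strip := by
  induction ws with
  | nil => rfl
  | cons w ws ih =>
    simp only [pvFindWordA, List.find?]
    by_cases h : PySem.Chars.isIn tl (PySem.Chars.lower w) = true
    · simp [h]
    · simp only [Bool.not_eq_true] at h; simp [h, ih]

theorem pvLoopA_eq (tl : List Char) (lines : List (List Char)) :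
    pvLoopA tl lines
      = ((lines.flatMap PySem.Chars.split₀).find?
          (fun w => PySem.Chars.isIn tl (PySem.Chars.lower w))).map PySem.Chars.strip := by
  induction lines with
  | nil => rfl
  | cons line rest ih =>
    simp only [pvLoopA, List.flatMap_cons, List.find?_append]
    by_cases hg : PySem.Chars.isIn tl (PySem.Chars.lower line) = true
    · rw [if_pos hg, pvFindWordA_eq]
      cases hfw : (PySem.Chars.split₀ line).find? (fun w => PySem.Chars.isIn tl (PySem.Chars.lower w)) with
      | none => simp [ih]
      | some w => simp
    · rw [if_neg hg]
      have : (PySem.Chars.split₀ line).find? (fun w => PySem.Chars.isIn tl (PySem.Chars.lower w)) = none := by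
        rw [List.find?_eq_none]
        intro w hw
        simp [pvGate (Bool.not_eq_true _ ▸ hg) w hw]
      simp [this, ih]

theorem pvBody (tgt s : String) :
    (pvLoopA (PySem.Chars.lower tgt.toList) (PySem.Chars.splitOn s.toList ['\n'])).map String.ofList
      = ((PySem.Chars.split₀ s.toList).find?
          (fun w => PySem.Chars.isIn (PySem.Chars.lower tgt.toList) (PySem.Chars.lower w))).map
        (fun w => String.ofList (PySem.Chars.strip w)) := by
  rw [pvLoopA_eq, pvFlatten_split]
  cases (PySem.Chars.split₀ s.toList).find?
      (fun w => PySem.Chars.isIn (PySem.Chars.lower tgt.toList) (PySem.Chars.lower w)) <;> simp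

-- ===== VERDICT (by name: the statement is the Claim_ definition above) =====
theorem find_matching_file_py_spec : Claim_equal_find_matching_file_py := by
  intro text screen_text _
  unfold Spec_find_matching_file_py find_matching_file_py find_matching_file_py_alt
  exact pvBody _ _
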